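-- pv_equiv track=rewrite | github.com/r5by/montgomery | mont/common.py | get_digit_radix
-- ===== SOURCE A (Python) =====
-- def get_digit_radix(u, i, b):
--     # Convert number u from base 10 to base b
--     digits = []
--     while u > 0:
--         remainder = u % b
--         digits.append(remainder)
--         u //= b
--
--     # If the requested digit index i is beyond the available digits, return 0 (assuming the higher digits are 0)
--     if i >= len(digits):
--         return 0
--
--     return digits[i]
-- ===== SOURCE B (Python) =====
-- def get_digit_radix(u, i, b):
--     # Closed form: digit i of u in base b is (u // b**i) % b.
--     # u <= 0 yields no digits; i >= u.bit_length() is past the top digit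
--     # for any base b >= 2 (and avoids computing a huge power).
--     if u <= 0 or i >= u.bit_length():
--         return 0
--     return (u // b**i) % b
-- ===== Notes on version B (the rewrite author's own statement) =====
-- stated objective: simpler
-- what changed: Replaces the loop that materializes the whole base-b digit list with the closed form (u // b**i) % b (plus a bit_length fast path for indices past the top digit); no list is built and no iteration over digits occurs.
-- outside the precondition, e.g. on get_digit_radix(11, -1, 2): A returns 1, B returns 0.0; on get_digit_radix(5, 1, -3): A returns 0, B returns -2
import Mathlib
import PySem

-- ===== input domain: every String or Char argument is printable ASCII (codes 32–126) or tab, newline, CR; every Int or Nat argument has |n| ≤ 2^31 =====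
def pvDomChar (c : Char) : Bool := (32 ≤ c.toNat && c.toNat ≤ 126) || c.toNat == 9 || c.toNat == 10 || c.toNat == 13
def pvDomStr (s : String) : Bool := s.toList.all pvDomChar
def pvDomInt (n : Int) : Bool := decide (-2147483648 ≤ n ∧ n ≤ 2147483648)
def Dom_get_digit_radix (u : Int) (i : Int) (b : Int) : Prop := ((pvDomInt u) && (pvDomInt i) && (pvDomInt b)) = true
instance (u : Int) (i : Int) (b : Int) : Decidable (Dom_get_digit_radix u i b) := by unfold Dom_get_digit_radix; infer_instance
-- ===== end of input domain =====

-- B replaces A's digit-list loop by the closed form (u // b**i) % b (with a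
-- bit_length fast path); equivalence is proved on Pre_ (i ≥ 0, and b ≥ 2 when u > 0).

-- ===== PORT A =====
-- the while-loop of A; fuel only makes the recursion total (u.natAbs + 1 iterations
-- always suffice on Pre_, where b ≥ 2 whenever the loop runs)
def pvLoopA (fuel : Nat) (u : Int) (b : Int) (digits : List Int) : List Int :=
  match fuel with
  | 0 => digits
  | f + 1 =>
    if u > 0 then
      pvLoopA f (PySem.Int.floordiv u b) b (digits ++ [PySem.Int.mod u b])
    else digits

def get_digit_radix (u : Int) (i : Int) (b : Int) : Int :=
  let digits := pvLoopA (u.natAbs + 1) u b []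
  if i ≥ (digits.length : Int) then 0
  else PySem.List.pyGetD digits i 0   -- digits[i]; Pre_ excludes the IndexError / negative-index cases

-- ===== PORT B =====
def get_digit_radix_alt (u : Int) (i : Int) (b : Int) : Int :=
  if u ≤ 0 ∨ i ≥ (PySem.Int.bitLength u : Int) then 0
  else PySem.Int.mod (PySem.Int.floordiv u (b ^ i.toNat)) b   -- b**i; Pre_ gives 0 ≤ i, so toNat is exact

-- ===== PRECONDITION & SPEC =====
-- Pre_ excludes negative digit indices i (A's Python negative-index wraparound into the
-- digit list, or IndexError, is accidental) and, when u > 0, radices b ≤ 1 (A raises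
-- ZeroDivisionError on b = 0, diverges on b = 1, and for b < 0 stops after a single
-- division — a truncation artefact of 'while u > 0', not a base-b expansion).
def Pre_get_digit_radix (u : Int) (i : Int) (b : Int) : Prop := 0 ≤ i ∧ (u ≤ 0 ∨ 2 ≤ b)
instance (u : Int) (i : Int) (b : Int) : Decidable (Pre_get_digit_radix u i b) := by
  unfold Pre_get_digit_radix; infer_instance

def pvWitness_get_digit_radix : Int × Int × Int := (11, 2, 2)

def Spec_get_digit_radix (u : Int) (i : Int) (b : Int) (out : Int) : Prop := out = get_digit_radix_alt u i b
instance (u : Int) (i : Int) (b : Int) (out : Int) : Decidable (Spec_get_digit_radix u i b out) := by unfold Spec_get_digit_radix; infer_instance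

-- ===== CLAIM (what is proved, stated in full; the proofs are below) =====
def Claim_equal_get_digit_radix : Prop := ∀ (u : Int) (i : Int) (b : Int), Dom_get_digit_radix u i b → Pre_get_digit_radix u i b → Spec_get_digit_radix u i b (get_digit_radix u i b)

-- ===== LEMMAS AND PROOFS =====

-- the accumulator only prefixes the result
theorem pvLoopA_acc (f : Nat) : ∀ (u b : Int) (acc : List Int),
    pvLoopA f u b acc = acc ++ pvLoopA f u b [] := by
  induction f with
  | zero => intro u b acc; simp [pvLoopA]
  | succ f ih =>
    intro u b acc
    by_cases h : u > 0
    · simp only [pvLoopA, if_pos h]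
      rw [ih _ _ (acc ++ [PySem.Int.mod u b])]
      rw [List.nil_append]
      rw [ih _ _ [PySem.Int.mod u b]]
      simp
    · simp [pvLoopA, h]

-- the guarded lookup collapses to List.getD (the default 0 coincides with the branch)
theorem pvIf_getD (l : List Int) (j : Nat) :
    (if ((j : Int)) ≥ (l.length : Int) then (0 : Int) else PySem.List.pyGetD l (j : Int) 0)
      = l.getD j 0 := by
  by_cases h : (j : Int) ≥ (l.length : Int)
  · rw [if_pos h, List.getD_eq_default]
    exact_mod_cast h
  · rw [if_neg h, PySem.List.pyGetD_natCast]

-- the j-th element produced by A's loop is (u / b^j) % b (0 when past the end)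
theorem pvLoopA_getD {b : Int} (hb : 2 ≤ b) : ∀ (f : Nat) (u : Int), 0 ≤ u → u < 2 ^ f →
    ∀ (j : Nat), (pvLoopA f u b []).getD j 0 = u / b ^ j % b := by
  intro f
  induction f with
  | zero =>
    intro u hu hlt j
    have h0 : u < 1 := by simpa using hlt
    have : u = 0 := by omega
    subst this
    simp [pvLoopA]
  | succ f ih =>
    intro u hu hlt j
    have hbpos : (0 : Int) < b := by omega
    by_cases h : u > 0
    · have hfd : PySem.Int.floordiv u b = u / b := PySem.Int.floordiv_eq_ediv_of_pos hbpos
      have hmd : PySem.Int.mod u b = u % b := PySem.Int.mod_eq_emod_of_pos hbpos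
      simp only [pvLoopA, if_pos h]
      rw [pvLoopA_acc, List.nil_append, List.singleton_append, hfd, hmd]
      have hq0 : 0 ≤ u / b := Int.ediv_nonneg hu (le_of_lt hbpos)
      have hqlt : u / b < 2 ^ f := by
        rw [Int.ediv_lt_iff_lt_mul hbpos]
        calc u < 2 ^ (f + 1) := hlt
          _ = 2 ^ f * 2 := by ring
          _ ≤ 2 ^ f * b := by
                have : (0 : Int) < 2 ^ f := by positivity
                nlinarith
      cases j with
      | zero => simp
      | succ j' =>
        simp only [List.getD_cons_succ]
        rw [ih (u / b) hq0 hqlt j']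
        rw [Int.ediv_ediv_of_nonneg (le_of_lt hbpos)]
        congr 1
        rw [pow_succ]
        ring_nf
    · have : u = 0 := by omega
      subst this
      simp [pvLoopA]

-- u < 2 ^ bitLength u for 0 < u, cast to Int
theorem pv_lt_two_pow (u : Int) (hu : 0 < u) : u < 2 ^ PySem.Int.bitLength u := by
  have h := PySem.Int.lt_two_pow_bitLength u
  calc u = (u.natAbs : Int) := by omega
    _ < ((2 ^ PySem.Int.bitLength u : Nat) : Int) := by exact_mod_cast h
    _ = 2 ^ PySem.Int.bitLength u := by push_cast; ring

-- ===== VERDICT (by name: the statement is the Claim_ definition above) =====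
theorem get_digit_radix_spec : Claim_equal_get_digit_radix := by
  intro u i b _ hpre
  obtain ⟨hi, hub⟩ := hpre
  unfold Spec_get_digit_radix get_digit_radix get_digit_radix_alt
  by_cases h : u > 0
  · have hb : 2 ≤ b := by rcases hub with h' | h' <;> omega
    have hbpos : (0 : Int) < b := by omega
    have hin : i = ((i.toNat : Nat) : Int) := by omega
    rw [hin]
    simp only [Int.toNat_natCast]
    rw [pvIf_getD]
    have hu0 : 0 ≤ u := le_of_lt h
    have hult : u < 2 ^ (u.natAbs + 1) := by
      have hn : u.natAbs < 2 ^ (u.natAbs + 1) :=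
        Nat.lt_two_pow_self.trans (Nat.pow_lt_pow_succ (by omega))
      calc u ≤ (u.natAbs : Int) := by omega
        _ < ((2 ^ (u.natAbs + 1) : Nat) : Int) := by exact_mod_cast hn
        _ = 2 ^ (u.natAbs + 1) := by push_cast; ring
    rw [pvLoopA_getD hb (u.natAbs + 1) u hu0 hult i.toNat]
    have hbpow : (0 : Int) < b ^ i.toNat := by positivity
    by_cases hbit : u ≤ 0 ∨ ((i.toNat : Nat) : Int) ≥ (PySem.Int.bitLength u : Int)
    · rw [if_pos hbit]
      have hbl : PySem.Int.bitLength u ≤ i.toNat := by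
        rcases hbit with h' | h' <;> [omega; exact_mod_cast h']
      -- u < b ^ i.toNat, so the digit is 0
      have hlt : u < b ^ i.toNat := by
        have h1 : u < 2 ^ PySem.Int.bitLength u := pv_lt_two_pow u h
        have h2 : (2 : Int) ^ PySem.Int.bitLength u ≤ 2 ^ i.toNat :=
          pow_le_pow_right₀ (by norm_num) hbl
        have h3 : (2 : Int) ^ i.toNat ≤ b ^ i.toNat :=
          pow_le_pow_left₀ (by norm_num) hb i.toNat
        linarith
      rw [Int.ediv_eq_zero_of_lt hu0 hlt]
      simp
    · rw [if_neg hbit]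
      rw [PySem.Int.mod_eq_emod_of_pos hbpos, PySem.Int.floordiv_eq_ediv_of_pos hbpow]
  · -- u ≤ 0: the loop never runs, digits = [], both sides are 0
    have hu : ¬ u > 0 := h
    simp only [pvLoopA, if_neg hu]
    rw [if_pos (by simpa using hi), if_pos (Or.inl (by omega))]
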